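-- pv_equiv track=rewrite | github.com/gfabieno/SeisCL | SeisCL/python/stencils/stencils.py | get_stencil
-- ===== SOURCE A (Python) =====
-- def get_stencil(order, nd, dim, forward=True, use_local=True):
--
--     if nd == 1:
--         posp = "(g.z+%d)"
--         posm = "(g.z-%d)"
--     elif nd == 2:
--         if dim == "x":
--             posp = "(g.z, g.x+%d)"
--             posm = "(g.z, g.x-%d)"
--         elif dim == "z":
--             posp = "(g.z+%d, g.x)"
--             posm = "(g.z-%d, g.x)"
--         else:
--             raise ValueError("dim must be x or z for 2D")
--     elif nd == 3:
--         if dim == "x":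
--             posp = "(g.z, g.y, g.x+%d)"
--             posm = "(g.z, g.y, g.x-%d)"
--         elif dim == "y":
--             posp = "(g.z, g.y+%d, g.x)"
--             posm = "(g.z, g.y-%d, g.x)"
--         elif dim == "z":
--             posp = "(g.z+%d, g.y, g.x)"
--             posm = "(g.z-%d, g.y, g.x)"
--         else:
--             raise ValueError("dim must be x, y or z for 3D")
--     if use_local:
--         posp = posp.replace("g.", "g.l")
--         posm = posm.replace("g.", "g.l")
--
--     if forward:
--         x = 1
--         flag = "p"
--     else:
--         x = 0
--         flag = "m"
--     dxp = "#define D%s%s(v) (" % (dim, flag)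
--     dxp += ("+\\\n" + " "*len(dxp)).join(["HC%d*(v%s-v%s)" % (ii+1,
--                                                               posp % (ii+x),
--                                                               posm % (ii+1-x))
--                                           for ii in range(order//2)])
--     dxp += ")\n"
--
--     return dxp
-- ===== SOURCE B (Python) =====
-- def get_stencil(order, nd, dim, forward=True, use_local=True):
--     x, flag = (1, "p") if forward else (0, "m")
--     head = "#define D%s%s(v) (" % (dim, flag)
--     sep = "+\\\n" + " " * len(head)
--     body = sep.join("HC%d*(v%s-v%s)" % (i + 1,
--                                         _pos(nd, dim, use_local, "+", i + x),
--                                         _pos(nd, dim, use_local, "-", i + 1 - x))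
--                     for i in range(order // 2))
--     return head + body + ")\n"
--
--
-- def _pos(nd, dim, use_local, sign, off):
--     axes = {1: ["z"], 2: ["z", "x"], 3: ["z", "y", "x"]}[nd]
--     k = 0 if nd == 1 else axes.index(dim)
--     pre = "g.l" if use_local else "g."
--     return "(%s)" % ", ".join(pre + a + (sign + str(off) if j == k else "")
--                               for j, a in enumerate(axes))
-- ===== Notes on version B (the rewrite author's own statement) =====
-- stated objective: simpler
-- what changed: Replaces the nested if/elif table of six literal positional format templates with a per-term position helper that computes each coordinate tuple from an axis list (['z'] / ['z','x'] / ['z','y','x']) and the index of dim, looked up lazily per emitted term; Pre_ excludes exactly the inputs where A raises (invalid dim for 2D/3D, and invalid nd unless the templates are never touched).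
import Mathlib
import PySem

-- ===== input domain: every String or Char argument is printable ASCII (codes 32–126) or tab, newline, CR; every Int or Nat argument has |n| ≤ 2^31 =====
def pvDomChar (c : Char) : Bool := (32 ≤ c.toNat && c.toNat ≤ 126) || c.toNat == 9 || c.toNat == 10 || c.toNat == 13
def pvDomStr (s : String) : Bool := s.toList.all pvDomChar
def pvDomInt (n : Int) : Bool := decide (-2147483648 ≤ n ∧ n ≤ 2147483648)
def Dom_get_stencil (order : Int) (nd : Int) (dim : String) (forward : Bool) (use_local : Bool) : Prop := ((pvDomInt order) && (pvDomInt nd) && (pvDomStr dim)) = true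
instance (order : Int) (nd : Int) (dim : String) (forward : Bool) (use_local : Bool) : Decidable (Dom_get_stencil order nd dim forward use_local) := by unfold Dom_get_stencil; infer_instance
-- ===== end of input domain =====

-- B replaces A's nested if/elif table of six literal positional templates by a lazy per-term
-- position helper computed from an axis list and the index of dim (objective: simpler);
-- return values agree on Pre_ (exactly where A returns).


-- ===== PORT A =====
-- Python's 'tmpl % n' for a template whose only '%' is in a single "%d": replace each "%d" by str(n) (exact there)
def pvFmtD (cs : List Char) (n : Int) : List Char :=
  match cs with
  | '%' :: 'd' :: rest => PySem.Int.toChars n ++ pvFmtD rest n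
  | c :: rest => c :: pvFmtD rest n
  | [] => []

def get_stencil (order : Int) (nd : Int) (dim : String) (forward : Bool) (use_local : Bool) : String :=
  -- the if/elif table; none = the branches where Python raises (ValueError / posp left unbound), excluded by Pre_
  let pm? : Option (List Char × List Char) :=
    if nd = 1 then some ("(g.z+%d)".toList, "(g.z-%d)".toList)
    else if nd = 2 then
      if dim = "x" then some ("(g.z, g.x+%d)".toList, "(g.z, g.x-%d)".toList)
      else if dim = "z" then some ("(g.z+%d, g.x)".toList, "(g.z-%d, g.x)".toList)
      else none    -- raise ValueError("dim must be x or z for 2D")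
    else if nd = 3 then
      if dim = "x" then some ("(g.z, g.y, g.x+%d)".toList, "(g.z, g.y, g.x-%d)".toList)
      else if dim = "y" then some ("(g.z, g.y+%d, g.x)".toList, "(g.z, g.y-%d, g.x)".toList)
      else if dim = "z" then some ("(g.z+%d, g.y, g.x)".toList, "(g.z-%d, g.y, g.x)".toList)
      else none    -- raise ValueError("dim must be x, y or z for 3D")
    else none      -- posp/posm left unbound
  match pm? with
  | none =>
    -- posp/posm unbound: Python raises at the .replace (use_local) or in the first loop iteration
    -- (order//2 ≥ 1); with neither, the templates are never read and the macro with an empty body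
    -- is returned.
    if use_local then ""                                   -- UnboundLocalError
    else if 1 ≤ PySem.Int.floordiv order 2 then ""         -- NameError in the loop body
    else String.mk ("#define D".toList ++ dim.toList ++ (if forward then ['p'] else ['m']) ++ "(v) (".toList ++ ")\n".toList)
  | some (posp0, posm0) =>
    let posp := if use_local then PySem.Chars.replace posp0 "g.".toList "g.l".toList else posp0
    let posm := if use_local then PySem.Chars.replace posm0 "g.".toList "g.l".toList else posm0
    let x : Int := if forward then 1 else 0
    let flag : List Char := if forward then ['p'] else ['m']
    let dxp := "#define D".toList ++ dim.toList ++ flag ++ "(v) (".toList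
    let body := PySem.Chars.join ("+\\\n".toList ++ List.replicate dxp.length ' ')
      ((PySem.List.pyRange 0 (PySem.Int.floordiv order 2) 1).map (fun ii =>
        "HC".toList ++ PySem.Int.toChars (ii + 1) ++ "*(v".toList ++
          pvFmtD posp (ii + x) ++ "-v".toList ++ pvFmtD posm (ii + 1 - x) ++ [')']))
    String.mk (dxp ++ body ++ ")\n".toList)

-- ===== PORT B =====
-- B's _pos(nd, dim, use_local, sign, off): coordinate tuple with the signed offset inserted at
-- the axis of dim; [] models the raises (KeyError on unknown nd, ValueError from .index), which
-- only happen outside Pre_.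
def pvPos (nd : Int) (dim : String) (use_local : Bool) (sign : Char) (off : Int) : List Char :=
  let axes? : Option (List (List Char)) :=
    if nd = 1 then some ["z".toList]
    else if nd = 2 then some ["z".toList, "x".toList]
    else if nd = 3 then some ["z".toList, "y".toList, "x".toList]
    else none
  match axes? with
  | none => []    -- KeyError
  | some axes =>
    let k? : Option Int :=
      if nd = 1 then some 0
      else (PySem.List.index? axes dim.toList).map (fun n => (n : Int))
    match k? with
    | none => []  -- ValueError from axes.index(dim)
    | some k =>
      let pre : List Char := if use_local then "g.l".toList else "g.".toList
      '(' :: (PySem.Chars.join ", ".toList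
        ((PySem.List.enumerate axes 0).map (fun ja =>
          pre ++ ja.2 ++ (if ja.1 = k then sign :: PySem.Int.toChars off else [])))) ++ [')']

def get_stencil_alt (order : Int) (nd : Int) (dim : String) (forward : Bool) (use_local : Bool) : String :=
  let x : Int := if forward then 1 else 0
  let flag : List Char := if forward then ['p'] else ['m']
  let head := "#define D".toList ++ dim.toList ++ flag ++ "(v) (".toList
  let sep := "+\\\n".toList ++ List.replicate head.length ' '
  let body := PySem.Chars.join sep
    ((PySem.List.pyRange 0 (PySem.Int.floordiv order 2) 1).map (fun i =>
      "HC".toList ++ PySem.Int.toChars (i + 1) ++ "*(v".toList ++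
        pvPos nd dim use_local '+' (i + x) ++ "-v".toList ++
        pvPos nd dim use_local '-' (i + 1 - x) ++ [')']))
  String.mk (head ++ body ++ ")\n".toList)

-- ===== PRECONDITION & SPEC =====
-- Pre_ is exactly A's return domain: nd in {1,2,3} with a valid dim for nd = 2/3, plus the corner
-- where the if/elif table leaves the templates unbound but they are never read (invalid nd with
-- use_local false and order < 2, where A returns an empty macro); everywhere else A raises
-- (ValueError / UnboundLocalError / NameError).
def Pre_get_stencil (order : Int) (nd : Int) (dim : String) (forward : Bool) (use_local : Bool) : Prop :=
  (nd = 1 ∨ (nd = 2 ∧ (dim = "x" ∨ dim = "z")) ∨ (nd = 3 ∧ (dim = "x" ∨ dim = "y" ∨ dim = "z")))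
  ∨ (¬(nd = 1 ∨ nd = 2 ∨ nd = 3) ∧ use_local = false ∧ order ≤ 1)
instance (order : Int) (nd : Int) (dim : String) (forward : Bool) (use_local : Bool) : Decidable (Pre_get_stencil order nd dim forward use_local) := by unfold Pre_get_stencil; infer_instance

def pvWitness_get_stencil : Int × Int × String × Bool × Bool := (4, 2, "x", true, true)

def Spec_get_stencil (order : Int) (nd : Int) (dim : String) (forward : Bool) (use_local : Bool) (out : String) : Prop := out = get_stencil_alt order nd dim forward use_local
instance (order : Int) (nd : Int) (dim : String) (forward : Bool) (use_local : Bool) (out : String) : Decidable (Spec_get_stencil order nd dim forward use_local out) := by unfold Spec_get_stencil; infer_instance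

-- ===== CLAIM (what is proved, stated in full; the proofs are below) =====
def Claim_equal_get_stencil : Prop := ∀ (order : Int) (nd : Int) (dim : String) (forward : Bool) (use_local : Bool), Dom_get_stencil order nd dim forward use_local → Pre_get_stencil order nd dim forward use_local → Spec_get_stencil order nd dim forward use_local (get_stencil order nd dim forward use_local)

-- ===== LEMMAS AND PROOFS =====

-- ===== VERDICT (by name: the statements are the Claim_ definitions above) =====
theorem get_stencil_spec : Claim_equal_get_stencil := by
  intro order nd dim fw ul _ hpre
  unfold Spec_get_stencil
  rcases hpre with (h1 | ⟨h2, hd⟩ | ⟨h3, hd⟩) | ⟨hnd, hul, hord⟩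
  · subst h1
    cases ul <;> cases fw <;>
      simp [get_stencil, get_stencil_alt, pvFmtD, pvPos, PySem.Chars.join,
        PySem.List.enumerate, PySem.Chars.replace, PySem.Chars.replace.go,
        List.append_assoc, List.intercalate, List.flatten]
  · subst h2
    rcases hd with hd | hd <;> subst hd <;> cases ul <;> cases fw <;>
      simp [get_stencil, get_stencil_alt, pvFmtD, pvPos, PySem.Chars.join,
        PySem.List.enumerate, PySem.Chars.replace, PySem.Chars.replace.go,
        List.append_assoc, List.intercalate, List.intersperse, List.flatten,
        PySem.List.index?, List.idxOf?, List.findIdx?, List.findIdx?.go]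
  · subst h3
    rcases hd with hd | hd | hd <;> subst hd <;> cases ul <;> cases fw <;>
      simp [get_stencil, get_stencil_alt, pvFmtD, pvPos, PySem.Chars.join,
        PySem.List.enumerate, PySem.Chars.replace, PySem.Chars.replace.go,
        List.append_assoc, List.intercalate, List.intersperse, List.flatten,
        PySem.List.index?, List.idxOf?, List.findIdx?, List.findIdx?.go]
  · -- the unbound-template corner: both sides return the empty macro
    have hn1 : nd ≠ 1 := fun h => hnd (Or.inl h)
    have hn2 : nd ≠ 2 := fun h => hnd (Or.inr (Or.inl h))
    have hn3 : nd ≠ 3 := fun h => hnd (Or.inr (Or.inr h))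
    have hlt : ¬ (1 : Int) ≤ order / 2 := by omega
    have hr : PySem.List.pyRange 0 (order / 2) 1 = [] := by
      apply List.eq_nil_of_length_eq_zero
      rw [PySem.List.length_pyRange_one]; omega
    cases fw <;>
      simp [get_stencil, get_stencil_alt, hn1, hn2, hn3, hul, hr, hlt,
        PySem.Chars.join, List.intercalate]
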